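-- pv_equiv track=rewrite | github.com/MegEngine/MegEngine | imperative/python/megengine/functional/einsum.py | einsum_infer_output_shape
-- ===== SOURCE A (Python) =====
-- def einsum_infer_output_shape(shapes):
--     ellipsis_found = "." in (dim for shape in shapes for dim in shape)
--     output_shape = (".",) if ellipsis_found else ()
--     dims = {"."}
--     dup_dims = {"."}
--     for shape in shapes:
--         for dim in shape:
--             if dim in dims:
--                 dup_dims.add(dim)
--             else:
--                 dims.add(dim)
--     unique_shapes = set()
--     for shape in shapes:
--         for dim in shape:
--             if dim not in dup_dims:
--                 unique_shapes.add(dim)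
--     unique_shapes = tuple(sorted(unique_shapes))
--     return output_shape + unique_shapes
-- ===== SOURCE B (Python) =====
-- def einsum_infer_output_shape(shapes):
--     # Sort-then-scan: sort the flattened dim labels, then one linear walk over
--     # adjacent runs picks the labels whose run has length 1 (skipping '.'),
--     # already in sorted order; the ellipsis flag is set when a '.' run is seen.
--     dims = sorted(d for shape in shapes for d in shape)
--     singles = []
--     has_ellipsis = False
--     i, n = 0, len(dims)
--     while i < n:
--         j = i + 1
--         while j < n and dims[j] == dims[i]:
--             j += 1
--         if dims[i] == ".":
--             has_ellipsis = True
--         elif j == i + 1: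
--             singles.append(dims[i])
--         i = j
--     return ((".",) if has_ellipsis else ()) + tuple(singles)
-- ===== Notes on version B (the rewrite author's own statement) =====
-- stated objective: alternative
-- what changed: Instead of A's set-based multiset bookkeeping (seen/dup sets built in two whole-input passes, then sorting the surviving set), B sorts the flattened labels first and does one linear scan over adjacent runs, emitting run representatives of length-1 runs (already in order) and flagging the ellipsis when a '.' run is met.
import Mathlib
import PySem

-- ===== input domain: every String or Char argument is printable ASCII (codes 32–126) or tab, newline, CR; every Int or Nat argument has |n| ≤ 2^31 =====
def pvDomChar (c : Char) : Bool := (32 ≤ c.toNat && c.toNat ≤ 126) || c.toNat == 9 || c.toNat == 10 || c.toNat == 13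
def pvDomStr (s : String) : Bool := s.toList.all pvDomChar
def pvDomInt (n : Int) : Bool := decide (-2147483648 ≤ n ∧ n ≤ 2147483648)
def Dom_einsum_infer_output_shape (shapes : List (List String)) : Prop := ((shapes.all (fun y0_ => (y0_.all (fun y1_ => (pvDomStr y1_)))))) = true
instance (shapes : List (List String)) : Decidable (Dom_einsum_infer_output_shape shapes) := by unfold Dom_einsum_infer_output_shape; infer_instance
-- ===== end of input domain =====

-- B replaces A's set-based bookkeeping (seen/dup sets in two passes, then sorting the
-- surviving set) by sort-first-then-one-run-scan over adjacent equal labels (alternative).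

-- ===== PORT A =====
def einsum_infer_output_shape (shapes : List (List String)) : List String :=
  let ellipsis_found := "." ∈ shapes.flatMap id
  let output_shape : List String := if ellipsis_found then ["."] else []
  let st := shapes.foldl
    (fun (st : PySem.Set String × PySem.Set String) shape =>
      shape.foldl
        (fun st dim =>
          if PySem.Set.contains st.1 dim then (st.1, PySem.Set.add st.2 dim)
          else (PySem.Set.add st.1 dim, st.2)) st)
    (PySem.Set.ofList ["."], PySem.Set.ofList ["."])
  let unique_shapes := shapes.foldl
    (fun (u : PySem.Set String) shape =>
      shape.foldl
        (fun u dim => if PySem.Set.contains st.2 dim then u else PySem.Set.add u dim) u)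
    PySem.Set.empty
  output_shape ++ PySem.List.sorted unique_shapes (fun x => x) false

-- ===== PORT B =====
-- the index-based run scan of Source B: the inner `while dims[j] == dims[i]` advance is the
-- dropWhile of the current label, the `j == i + 1` test is `takeWhile … = []`
def runScanB (l : List String) (e : Bool) (acc : List String) : Bool × List String :=
  match l with
  | [] => (e, acc)
  | x :: rest =>
    let rest' := rest.dropWhile (fun y => y == x)
    if x == "." then runScanB rest' true acc
    else if rest.takeWhile (fun y => y == x) = [] then runScanB rest' e (acc ++ [x])
    else runScanB rest' e acc
termination_by l.length
decreasing_by all_goals exact Nat.lt_succ_of_le (List.length_dropWhile_le _ _)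

def einsum_infer_output_shape_alt (shapes : List (List String)) : List String :=
  let dims := PySem.List.sorted (shapes.flatMap id) (fun x => x) false
  let r := runScanB dims false []
  (if r.1 then ["."] else []) ++ r.2

-- ===== PRECONDITION & SPEC =====
def Spec_einsum_infer_output_shape (shapes : List (List String)) (out : List String) : Prop := out = einsum_infer_output_shape_alt shapes
instance (shapes : List (List String)) (out : List String) : Decidable (Spec_einsum_infer_output_shape shapes out) := by unfold Spec_einsum_infer_output_shape; infer_instance

-- ===== CLAIM (what is proved, stated in full; the proofs are below) =====
def Claim_equal_einsum_infer_output_shape : Prop := ∀ (shapes : List (List String)), Dom_einsum_infer_output_shape shapes → Spec_einsum_infer_output_shape shapes (einsum_infer_output_shape shapes)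

-- ===== LEMMAS AND PROOFS =====

-- a nested foldl over shapes is a foldl over the flattened list
theorem foldl_foldl_flatten {α β : Type} (f : β → α → β) (shapes : List (List α)) (init : β) :
    shapes.foldl (fun acc sh => sh.foldl f acc) init = (shapes.flatMap id).foldl f init := by
  induction shapes generalizing init with
  | nil => rfl
  | cons sh t ih => simp [List.foldl_append, ih]

theorem dims_snd_mem (l : List String) (d dd : PySem.Set String) (x : String) :
    x ∈ (l.foldl (fun st dim =>
        if PySem.Set.contains st.1 dim then (st.1, PySem.Set.add st.2 dim)
        else (PySem.Set.add st.1 dim, st.2)) (d, dd)).2 ↔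
      x ∈ dd ∨ (x ∈ d ∧ x ∈ l) ∨ 2 ≤ l.count x := by
  induction l generalizing d dd with
  | nil => simp
  | cons a t ih =>
    simp only [List.foldl_cons]
    by_cases h : a ∈ d
    · rw [if_pos (by simpa [PySem.Set.contains] using h), ih]
      by_cases hxa : x = a
      · subst hxa; simp [h, PySem.Set.mem_add]
      · have hax : ¬((a == x) = true) := by simpa using Ne.symm hxa
        simp only [PySem.Set.mem_add, List.count_cons, List.mem_cons, hxa, or_false,
          if_neg hax, Nat.add_zero]
        tauto
    · rw [if_neg (by simpa [PySem.Set.contains] using h), ih]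
      by_cases hxa : x = a
      · subst hxa
        constructor
        · rintro (h1 | ⟨h2, h3⟩ | h4)
          · exact Or.inl h1
          · refine Or.inr (Or.inr ?_)
            have : 0 < t.count x := List.count_pos_iff.mpr h3
            simp only [List.count_cons, beq_self_eq_true, if_true]
            omega
          · refine Or.inr (Or.inr ?_)
            simp only [List.count_cons, beq_self_eq_true, if_true]
            omega
        · rintro (h1 | ⟨h2, _⟩ | h4)
          · exact Or.inl h1
          · exact absurd h2 h
          · have h4' : 2 ≤ t.count x + 1 := by
              simpa [List.count_cons] using h4
            by_cases ht : x ∈ t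
            · exact Or.inr (Or.inl ⟨by simp [PySem.Set.mem_add], ht⟩)
            · have : t.count x = 0 := List.count_eq_zero.mpr ht
              omega
      · have hax : ¬((a == x) = true) := by simpa using Ne.symm hxa
        simp only [PySem.Set.mem_add, List.count_cons, List.mem_cons, hxa, or_false,
          if_neg hax, Nat.add_zero]
        tauto

theorem uniq_mem (dd : PySem.Set String) (l : List String) (u : PySem.Set String) (x : String) :
    x ∈ (l.foldl (fun u dim => if PySem.Set.contains dd dim then u else PySem.Set.add u dim) u) ↔
      x ∈ u ∨ (x ∈ l ∧ x ∉ dd) := by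
  induction l generalizing u with
  | nil => simp
  | cons a t ih =>
    simp only [List.foldl_cons]
    by_cases h : a ∈ dd
    · rw [if_pos (by simpa [PySem.Set.contains] using h), ih]
      simp only [List.mem_cons]
      by_cases hxa : x = a <;> simp [hxa, h]
    · rw [if_neg (by simpa [PySem.Set.contains] using h), ih]
      simp only [PySem.Set.mem_add, List.mem_cons]
      by_cases hxa : x = a <;> simp [hxa, h]

theorem uniq_nodup (dd : PySem.Set String) (l : List String) (u : PySem.Set String)
    (hu : u.Nodup) :
    (l.foldl (fun u dim => if PySem.Set.contains dd dim then u else PySem.Set.add u dim) u).Nodup := by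
  induction l generalizing u with
  | nil => simpa
  | cons a t ih =>
    simp only [List.foldl_cons]
    split
    · exact ih u hu
    · exact ih _ (PySem.Set.nodup_add _ _ hu)

-- the run scan sets the ellipsis flag iff '.' occurs (any list: skipped run elements equal the head)
theorem runScanB_fst (l : List String) (e : Bool) (acc : List String) :
    (runScanB l e acc).1 = (e || decide ("." ∈ l)) := by
  induction l, e, acc using runScanB.induct with
  | case1 e acc => simp [runScanB]
  | case2 e acc x rest rest' hx ih =>
    rw [runScanB]
    simp only [if_pos hx]
    rw [show List.dropWhile (fun y => y == x) rest = rest' from rfl, ih]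
    have : (("." : String) ∈ x :: rest) := by simp [(by simpa using hx : x = ".")]
    simp [this]
  | case3 e acc x rest rest' hx hrun ih =>
    rw [runScanB]
    simp only [if_neg hx, if_pos hrun]
    rw [show List.dropWhile (fun y => y == x) rest = rest' from rfl, ih]
    congr 1
    have hne : x ≠ "." := fun h => hx (by simp [h])
    have hmem : ("." ∈ rest) ↔ ("." ∈ rest') := by
      constructor
      · intro h
        rcases (List.mem_append.mp (by
            rw [List.takeWhile_append_dropWhile (p := fun y => y == x)] ; exact h)) with h1 | h2
        · exact absurd (by simpa using List.mem_takeWhile_imp h1) (Ne.symm hne)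
        · exact h2
      · intro h; exact (List.dropWhile_sublist _).mem h
    simp [List.mem_cons, Ne.symm hne, hmem]
  | case4 e acc x rest rest' hx hrun ih =>
    rw [runScanB]
    simp only [if_neg hx, if_neg hrun]
    rw [show List.dropWhile (fun y => y == x) rest = rest' from rfl, ih]
    congr 1
    have hne : x ≠ "." := fun h => hx (by simp [h])
    have hmem : ("." ∈ rest) ↔ ("." ∈ rest') := by
      constructor
      · intro h
        rcases (List.mem_append.mp (by
            rw [List.takeWhile_append_dropWhile (p := fun y => y == x)] ; exact h)) with h1 | h2
        · exact absurd (by simpa using List.mem_takeWhile_imp h1) (Ne.symm hne)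
        · exact h2
      · intro h; exact (List.dropWhile_sublist _).mem h
    simp [List.mem_cons, Ne.symm hne, hmem]

-- the head of a ≤-sorted list does not survive dropping its own run
theorem head_not_mem_dropWhile (x : String) (rest : List String)
    (h : (x :: rest).Pairwise (· ≤ ·)) :
    x ∉ rest.dropWhile (fun y => y == x) := by
  intro hmem
  have hpw' : (rest.dropWhile (fun y => y == x)).Pairwise (· ≤ ·) :=
    List.Pairwise.sublist (List.dropWhile_sublist _) (List.pairwise_cons.mp h).2
  cases hr : rest.dropWhile (fun y => y == x) with
  | nil => rw [hr] at hmem; exact absurd hmem (List.not_mem_nil)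
  | cons z t =>
    have hzx : z ≠ x := by
      have hz := List.head?_dropWhile_not (fun y => y == x) rest
      rw [hr] at hz; simpa using hz
    rw [hr] at hmem hpw'
    rcases List.mem_cons.mp hmem with h1 | h1
    · exact hzx h1.symm
    · have hle1 : z ≤ x := (List.pairwise_cons.mp hpw').1 x h1
      have hle2 : x ≤ z := (List.pairwise_cons.mp h).1 z (by
        have : z ∈ rest.dropWhile (fun y => y == x) := by rw [hr]; exact List.mem_cons_self
        exact (List.dropWhile_sublist _).mem this)
      exact hzx (le_antisymm hle1 hle2)

-- splitting the count-1 filter of a ≤-sorted list at its first run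
theorem filter_run_split (x : String) (rest : List String)
    (h : (x :: rest).Pairwise (· ≤ ·)) :
    (x :: rest).filter (fun z => (x :: rest).count z == 1 && z != ".") =
      (if rest.takeWhile (fun y => y == x) = [] ∧ x ≠ "." then [x] else []) ++
      (rest.dropWhile (fun y => y == x)).filter
        (fun z => (rest.dropWhile (fun y => y == x)).count z == 1 && z != ".") := by
  have hsplit : rest.takeWhile (fun y => y == x) ++ rest.dropWhile (fun y => y == x) = rest :=
    List.takeWhile_append_dropWhile
  have hxr : x ∉ rest.dropWhile (fun y => y == x) := head_not_mem_dropWhile x rest h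
  have hmemrun : ∀ b ∈ rest.takeWhile (fun y => y == x), b = x :=
    fun b hb => by simpa using List.mem_takeWhile_imp hb
  have hcx : (x :: rest).count x = (rest.takeWhile (fun y => y == x)).length + 1 := by
    have h0 : rest.count x = (rest.takeWhile (fun y => y == x)).length := by
      conv_lhs => rw [← hsplit]
      rw [List.count_append, List.count_eq_zero.mpr hxr,
        List.count_eq_length.mpr (fun b hb => (hmemrun b hb).symm)]
      simp
    rw [List.count_cons_self, h0]
  have hcy : ∀ y ∈ rest.dropWhile (fun y => y == x),
      (x :: rest).count y = (rest.dropWhile (fun y => y == x)).count y := by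
    intro y hy
    have hyx : y ≠ x := fun hyx => hxr (hyx ▸ hy)
    have h1 : List.count y (x :: rest) = List.count y rest := by
      simp [List.count_cons, (show ¬(x == y) = true by simpa using Ne.symm hyx)]
    rw [h1]
    conv_lhs => rw [← hsplit]
    rw [List.count_append, List.count_eq_zero.mpr (fun hmem => hyx (hmemrun y hmem))]
    simp
  set p : String → Bool := fun z => ((x :: rest).count z == 1 && z != ".") with hp
  have hfilter : (x :: rest).filter p =
      ((if p x then [x] else []) ++ (rest.takeWhile (fun y => y == x)).filter p) ++
        (rest.dropWhile (fun y => y == x)).filter p := by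
    conv_lhs => rw [show (x :: rest) =
      x :: (rest.takeWhile (fun y => y == x) ++ rest.dropWhile (fun y => y == x)) from by
        rw [hsplit]]
    rw [List.filter_cons, List.filter_append]
    split <;> simp
  have hrunnil : (rest.takeWhile (fun y => y == x)).filter p = [] := by
    rw [List.filter_eq_nil_iff]
    intro b hb
    simp only [hp]
    rw [hmemrun b hb, hcx]
    have hne : rest.takeWhile (fun y => y == x) ≠ [] := by
      intro hn; rw [hn] at hb; exact absurd hb (List.not_mem_nil)
    have hlen : 0 < (rest.takeWhile (fun y => y == x)).length := List.length_pos_iff.mpr hne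
    simp only [Bool.and_eq_true, beq_iff_eq, bne_iff_ne, not_and]
    intro hc
    exact absurd hc (by omega)
  have hcongr : (rest.dropWhile (fun y => y == x)).filter p =
      (rest.dropWhile (fun y => y == x)).filter
        (fun z => (rest.dropWhile (fun y => y == x)).count z == 1 && z != ".") :=
    List.filter_congr (fun y hy => by simp only [hp]; rw [hcy y hy])
  rw [hfilter, hrunnil, hcongr]
  by_cases hx : rest.takeWhile (fun y => y == x) = [] ∧ x ≠ "."
  · have hpx : p x = true := by
      simp only [hp]; rw [hcx, hx.1]; simp [hx.2]
    rw [if_pos hpx, if_pos hx]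
    simp
  · have hpx : ¬ p x = true := by
      simp only [hp]
      rw [hcx]
      intro hc
      simp only [Bool.and_eq_true, beq_iff_eq, bne_iff_ne] at hc
      exact hx ⟨List.length_eq_zero_iff.mp (by omega), hc.2⟩
    rw [if_neg hpx, if_neg hx]
    simp

-- on a ≤-sorted list the run scan emits exactly the labels with count 1 (except '.'), in order
theorem runScanB_snd (l : List String) (e : Bool) (acc : List String) :
    l.Pairwise (· ≤ ·) →
    (runScanB l e acc).2 = acc ++ l.filter (fun x => l.count x == 1 && x != ".") := by
  induction l, e, acc using runScanB.induct with
  | case1 e acc => intro _; simp [runScanB]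
  | case2 e acc x rest rest' hx ih =>
    intro h
    have hpw' : rest'.Pairwise (· ≤ ·) := List.Pairwise.sublist (List.dropWhile_sublist _) (List.pairwise_cons.mp h).2
    rw [runScanB]
    simp only [if_pos hx]
    have hxd : x = "." := by simpa using hx
    rw [show List.dropWhile (fun y => y == x) rest = rest' from rfl, ih hpw',
      filter_run_split x rest h, if_neg (fun hc => hc.2 hxd),
      show List.dropWhile (fun y => y == x) rest = rest' from rfl]
    simp
  | case3 e acc x rest rest' hx hrun ih =>
    intro h
    have hpw' : rest'.Pairwise (· ≤ ·) := List.Pairwise.sublist (List.dropWhile_sublist _) (List.pairwise_cons.mp h).2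
    have hne : x ≠ "." := fun hh => hx (by simp [hh])
    rw [runScanB]
    simp only [if_neg hx, if_pos hrun]
    rw [show List.dropWhile (fun y => y == x) rest = rest' from rfl, ih hpw',
      filter_run_split x rest h, if_pos ⟨hrun, hne⟩,
      show List.dropWhile (fun y => y == x) rest = rest' from rfl]
    simp
  | case4 e acc x rest rest' hx hrun ih =>
    intro h
    have hpw' : rest'.Pairwise (· ≤ ·) := List.Pairwise.sublist (List.dropWhile_sublist _) (List.pairwise_cons.mp h).2
    have hne : x ≠ "." := fun hh => hx (by simp [hh])
    rw [runScanB]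
    simp only [if_neg hx, if_neg hrun]
    rw [show List.dropWhile (fun y => y == x) rest = rest' from rfl, ih hpw',
      filter_run_split x rest h, if_neg (fun hc => hrun hc.1),
      show List.dropWhile (fun y => y == x) rest = rest' from rfl]
    simp

-- the kept labels are pairwise distinct (each has count 1 in the sorted list)
theorem filter_count_one_nodup (l : List String) :
    (l.filter (fun x => l.count x == 1 && x != ".")).Nodup := by
  apply List.nodup_iff_count_le_one.mpr
  intro a
  by_cases ha : a ∈ l.filter (fun x => l.count x == 1 && x != ".")
  · have h01 := List.of_mem_filter ha
    simp only [Bool.and_eq_true, beq_iff_eq, bne_iff_ne] at h01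
    calc _ ≤ l.count a := (List.filter_sublist (l := l)).count_le a
      _ = 1 := h01.1
  · rw [List.count_eq_zero.mpr ha]; omega

-- ===== VERDICT (by name: the statement is the Claim_ definition above) =====
theorem einsum_infer_output_shape_spec : Claim_equal_einsum_infer_output_shape := by
  intro shapes _
  show einsum_infer_output_shape shapes = einsum_infer_output_shape_alt shapes
  simp only [einsum_infer_output_shape, einsum_infer_output_shape_alt]
  rw [foldl_foldl_flatten, foldl_foldl_flatten]
  have hpw : (PySem.List.sorted (shapes.flatMap id) (fun x => x) false).Pairwise (· ≤ ·) :=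
    PySem.List.sorted_pairwise (shapes.flatMap id) (fun x => x)
  have hperm := PySem.List.sorted_perm (shapes.flatMap id) (fun x : String => x) false
  rw [runScanB_fst, runScanB_snd _ _ _ hpw]
  congr 1
  · simp [PySem.List.mem_sorted]
  · rw [List.nil_append]
    apply PySem.List.sorted_eq_of_perm_of_pairwise_lt
    · -- the filtered run representatives are a rearrangement of the set A builds
      refine (List.perm_ext_iff_of_nodup (filter_count_one_nodup _)
        (uniq_nodup _ _ _ List.nodup_nil)).mpr ?_
      intro y
      rw [List.mem_filter, uniq_mem, dims_snd_mem]
      simp only [PySem.List.mem_sorted, hperm.count_eq, PySem.Set.mem_ofList,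
        List.mem_singleton, List.not_mem_nil, false_or, Bool.and_eq_true, beq_iff_eq,
        bne_iff_ne, ne_eq]
      constructor
      · rintro ⟨hm, hc, hne⟩
        refine ⟨hm, ?_⟩
        rintro (h1 | ⟨h1, _⟩ | h1)
        · exact hne h1
        · exact hne h1
        · omega
      · rintro ⟨hm, hnd⟩
        push Not at hnd
        obtain ⟨h1, _, h3⟩ := hnd
        have hpos : 0 < List.count y (List.flatMap id shapes) := List.count_pos_iff.mpr hm
        exact ⟨hm, by omega, h1⟩
    · -- strictly increasing: ≤-sorted and pairwise distinct
      exact ((hpw.filter _).and (filter_count_one_nodup _)).imp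
        (fun hab => lt_of_le_of_ne hab.1 hab.2)
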